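-- pv_equiv track=rewrite | github.com/wzygxr/shuati | class122_GreedyAlgorithm/Code37_Candy.py | candy_brute_force
-- ===== SOURCE A (Python) =====
-- from typing import List
--
-- def candy_brute_force(ratings: List[int]) -> int:
--     """
--     暴力解法：模拟分配过程
--     时间复杂度：O(n^2)
--     空间复杂度：O(n)
--     """
--     if not ratings:
--         return 0
--
--     n = len(ratings)
--     candies = [1] * n
--
--     changed = True
--     while changed:
--         changed = False
--         for i in range(n):
--             # 检查左边邻居
--             if i > 0 and ratings[i] > ratings[i - 1] and candies[i] <= candies[i - 1]:
--                 candies[i] = candies[i - 1] + 1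
--                 changed = True
--             # 检查右边邻居
--             if i < n - 1 and ratings[i] > ratings[i + 1] and candies[i] <= candies[i + 1]:
--                 candies[i] = candies[i + 1] + 1
--                 changed = True
--
--     return sum(candies)
-- ===== SOURCE B (Python) =====
-- from typing import List
--
-- def _ascents(r: List[int]) -> List[int]:
--     """out[i] = length of the strictly increasing run of r ending at i."""
--     out = []
--     prev_r = None
--     prev_c = 0
--     for x in r:
--         c = prev_c + 1 if prev_r is not None and x > prev_r else 1
--         out.append(c)
--         prev_r = x
--         prev_c = c
--     return out
--
-- def candy_brute_force(ratings: List[int]) -> int: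
--     left = _ascents(ratings)
--     right = _ascents(ratings[::-1])[::-1]
--     return sum(max(a, b) for a, b in zip(left, right))
-- ===== Notes on version B (the rewrite author's own statement) =====
-- stated objective: faster
-- what changed: Replaced A's repeated full-array relaxation passes (loop until no candy count changes) by the standard two-pass greedy: a left-to-right increasing-run scan, the same scan on the reversed list for the right side, and a sum of pointwise maxima.
import Mathlib
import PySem

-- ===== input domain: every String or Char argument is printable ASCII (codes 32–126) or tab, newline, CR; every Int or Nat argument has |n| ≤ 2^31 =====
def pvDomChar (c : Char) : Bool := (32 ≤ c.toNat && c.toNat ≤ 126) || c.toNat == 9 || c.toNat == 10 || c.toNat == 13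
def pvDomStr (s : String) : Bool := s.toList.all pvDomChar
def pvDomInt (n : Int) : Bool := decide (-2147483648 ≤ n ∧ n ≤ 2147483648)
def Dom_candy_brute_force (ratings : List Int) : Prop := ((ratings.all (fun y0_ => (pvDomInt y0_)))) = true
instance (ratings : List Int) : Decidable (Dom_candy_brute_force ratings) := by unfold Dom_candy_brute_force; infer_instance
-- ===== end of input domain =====

-- B replaces A's repeated relaxation passes by the O(n) two-pass greedy (left/right increasing-run scans, sum of maxima).

-- ===== PORT A =====
-- one iteration of A's inner `for i in range(n)` body (two conditional neighbour updates on `candies`, flag `changed`)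
def pvStepA (r : List Int) (n : Nat) (st : List Int × Bool) (i : Nat) : List Int × Bool :=
  let p1 : List Int × Bool :=
    if 0 < i ∧ r.getD i 0 > r.getD (i - 1) 0 ∧ st.1.getD i 0 ≤ st.1.getD (i - 1) 0 then
      (st.1.set i (st.1.getD (i - 1) 0 + 1), true)
    else st
  if i < n - 1 ∧ r.getD i 0 > r.getD (i + 1) 0 ∧ p1.1.getD i 0 ≤ p1.1.getD (i + 1) 0 then
    (p1.1.set i (p1.1.getD (i + 1) 0 + 1), true)
  else p1

-- one full pass of A's `for i in range(n)` with `changed = False` at entry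
def pvPassA (r : List Int) (n : Nat) (c : List Int) : List Int × Bool :=
  (List.range n).foldl (pvStepA r n) (c, false)

-- A's `while changed` loop; the fuel only makes the recursion structural — the proof below shows
-- the loop always stabilises (changed = False) before n*n+1 passes, so this computes what Python computes.
def pvLoopA (r : List Int) (n : Nat) : Nat → List Int → List Int
  | 0, c => c
  | fuel + 1, c =>
    let p := pvPassA r n c
    if p.2 then pvLoopA r n fuel p.1 else p.1

def candy_brute_force (ratings : List Int) : Int :=
  if ratings = [] then 0
  else
    (pvLoopA ratings ratings.length (ratings.length * ratings.length + 1)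
      (List.replicate ratings.length 1)).sum

-- ===== PORT B =====
-- the body of B's `_ascents` loop: prev_r/prev_c carried along the list
def pvAscGo (prevR prevC : Int) : List Int → List Int
  | [] => []
  | x :: xs =>
    let c := if x > prevR then prevC + 1 else 1
    c :: pvAscGo x c xs

-- B's `_ascents` (first element: prev_r is None, so c = 1)
def pvAscents : List Int → List Int
  | [] => []
  | x :: xs => 1 :: pvAscGo x 1 xs

def candy_brute_force_alt (ratings : List Int) : Int :=
  let left := pvAscents ratings
  let right := (pvAscents ratings.reverse).reverse
  (List.zipWith (fun a b => max a b) left right).sum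

-- ===== PRECONDITION & SPEC =====
def Spec_candy_brute_force (ratings : List Int) (out : Int) : Prop := out = candy_brute_force_alt ratings
instance (ratings : List Int) (out : Int) : Decidable (Spec_candy_brute_force ratings out) := by unfold Spec_candy_brute_force; infer_instance

-- ===== CLAIM (what is proved, stated in full; the proofs are below) =====
def Claim_equal_candy_brute_force : Prop := ∀ (ratings : List Int), Dom_candy_brute_force ratings → Spec_candy_brute_force ratings (candy_brute_force ratings)

-- ===== LEMMAS AND PROOFS =====

-- the target list: pointwise max of the left and right run-length lists (what B sums)
def pvF (r : List Int) : List Int :=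
  List.zipWith (fun a b => max a b) (pvAscents r) ((pvAscents r.reverse).reverse)

-- abbreviations for the proofs
def pvL (r : List Int) (i : Nat) : Int := (pvAscents r).getD i 0
def pvR (r : List Int) (i : Nat) : Int := ((pvAscents r.reverse).reverse).getD i 0

theorem pvAscGo_length (p c : Int) (xs : List Int) : (pvAscGo p c xs).length = xs.length := by
  induction xs generalizing p c with
  | nil => rfl
  | cons x xs ih => simp [pvAscGo, ih]

theorem pvAscents_length (r : List Int) : (pvAscents r).length = r.length := by
  cases r with
  | nil => rfl
  | cons x xs => simp [pvAscents, pvAscGo_length]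

theorem pvAscGo_getD_succ (xs : List Int) (p c : Int) (j : Nat) (h : j + 1 < xs.length) :
    (pvAscGo p c xs).getD (j + 1) 0 =
      if xs.getD (j + 1) 0 > xs.getD j 0 then (pvAscGo p c xs).getD j 0 + 1 else 1 := by
  induction xs generalizing p c j with
  | nil => simp at h
  | cons x xs ih =>
    cases j with
    | zero =>
      cases xs with
      | nil => simp at h
      | cons y ys => simp [pvAscGo]
    | succ k =>
      have hk : k + 1 < xs.length := by simp at h; omega
      simpa [pvAscGo] using ih x (if x > p then c + 1 else 1) k hk

theorem pvL_zero (r : List Int) (h : 0 < r.length) : pvL r 0 = 1 := by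
  cases r with
  | nil => simp at h
  | cons x xs => rfl

theorem pvL_succ (r : List Int) (i : Nat) (h : i + 1 < r.length) :
    pvL r (i + 1) = if r.getD (i + 1) 0 > r.getD i 0 then pvL r i + 1 else 1 := by
  cases r with
  | nil => simp at h
  | cons x xs =>
    cases i with
    | zero =>
      cases xs with
      | nil => simp at h
      | cons y ys => simp [pvL, pvAscents, pvAscGo]
    | succ k =>
      have hk : k + 1 < xs.length := by simp at h; omega
      simpa [pvL, pvAscents] using pvAscGo_getD_succ xs x 1 k hk

theorem pvGetD_reverse (l : List Int) (i : Nat) (h : i < l.length) :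
    l.reverse.getD i 0 = l.getD (l.length - 1 - i) 0 := by
  rw [List.getD_eq_getElem _ _ (by simpa using h), List.getD_eq_getElem _ _ (by omega),
    List.getElem_reverse]

theorem pvR_eq (r : List Int) (i : Nat) (h : i < r.length) :
    pvR r i = pvL r.reverse (r.length - 1 - i) := by
  unfold pvR pvL
  have := pvGetD_reverse (pvAscents r.reverse) i
    (by rw [pvAscents_length]; simpa using h)
  rw [this, pvAscents_length, List.length_reverse]

theorem pvR_last (r : List Int) (h : 0 < r.length) : pvR r (r.length - 1) = 1 := by
  rw [pvR_eq r _ (by omega)]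
  have e : r.length - 1 - (r.length - 1) = 0 := by omega
  rw [e, pvL_zero r.reverse (by simpa using h)]

theorem pvR_rec (r : List Int) (i : Nat) (h : i + 1 < r.length) :
    pvR r i = if r.getD i 0 > r.getD (i + 1) 0 then pvR r (i + 1) + 1 else 1 := by
  have e1 : r.length - 1 - i = (r.length - 2 - i) + 1 := by omega
  rw [pvR_eq r i (by omega), e1]
  rw [pvL_succ r.reverse (r.length - 2 - i) (by simp; omega)]
  rw [← e1]
  rw [pvGetD_reverse r (r.length - 1 - i) (by omega)]
  rw [pvGetD_reverse r (r.length - 2 - i) (by omega)]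
  have e2 : r.length - 1 - (r.length - 1 - i) = i := by omega
  have e3 : r.length - 1 - (r.length - 2 - i) = i + 1 := by omega
  rw [e2, e3]
  rw [pvR_eq r (i + 1) (by omega)]
  have e4 : r.length - 1 - (i + 1) = r.length - 2 - i := by omega
  rw [e4]

theorem pvL_pos (r : List Int) (i : Nat) (h : i < r.length) : 1 ≤ pvL r i := by
  induction i with
  | zero => rw [pvL_zero r h]
  | succ k ih =>
    rw [pvL_succ r k h]
    split_ifs with hc
    · have := ih (by omega); omega
    · omega

theorem pvL_le (r : List Int) (i : Nat) (h : i < r.length) : pvL r i ≤ (i : Int) + 1 := by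
  induction i with
  | zero => rw [pvL_zero r h]; simp
  | succ k ih =>
    rw [pvL_succ r k h]
    split_ifs with hc
    · have := ih (by omega); push_cast; omega
    · push_cast; omega

theorem pvR_pos (r : List Int) (i : Nat) (h : i < r.length) : 1 ≤ pvR r i := by
  have key : ∀ k i, i < r.length → r.length - 1 - i = k → 1 ≤ pvR r i := by
    intro k
    induction k with
    | zero =>
      intro i hi hk
      have : i = r.length - 1 := by omega
      subst this
      rw [pvR_last r (by omega)]
    | succ k ih =>
      intro i hi hk
      rw [pvR_rec r i (by omega)]
      split_ifs with hc
      · have := ih (i + 1) (by omega) (by omega); omega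
      · omega
  exact key (r.length - 1 - i) i h rfl

theorem pvR_le (r : List Int) (i : Nat) (h : i < r.length) : pvR r i ≤ (r.length : Int) - i := by
  have key : ∀ k i, i < r.length → r.length - 1 - i = k → pvR r i ≤ (r.length : Int) - i := by
    intro k
    induction k with
    | zero =>
      intro i hi hk
      have : i = r.length - 1 := by omega
      subst this
      rw [pvR_last r (by omega)]
      have : 0 < r.length := by omega
      omega
    | succ k ih =>
      intro i hi hk
      rw [pvR_rec r i (by omega)]
      split_ifs with hc
      · have := ih (i + 1) (by omega) (by omega); push_cast at this; omega
      · omega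
  exact key (r.length - 1 - i) i h rfl

theorem pvF_length (r : List Int) : (pvF r).length = r.length := by
  simp [pvF, pvAscents_length]

theorem pvF_getD (r : List Int) (i : Nat) (h : i < r.length) :
    (pvF r).getD i 0 = max (pvL r i) (pvR r i) := by
  have hF : i < (pvF r).length := by rw [pvF_length]; exact h
  unfold pvF at hF ⊢
  rw [List.getD_eq_getElem _ _ hF, List.getElem_zipWith]
  unfold pvL pvR
  rw [List.getD_eq_getElem _ _ (by rw [pvAscents_length]; exact h),
    List.getD_eq_getElem _ _ (by rw [List.length_reverse, pvAscents_length, List.length_reverse]; exact h)]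

theorem pvF_pos (r : List Int) (i : Nat) (h : i < r.length) : 1 ≤ (pvF r).getD i 0 := by
  rw [pvF_getD r i h]; exact le_trans (pvL_pos r i h) (le_max_left _ _)

theorem pvF_le (r : List Int) (i : Nat) (h : i < r.length) : (pvF r).getD i 0 ≤ (r.length : Int) := by
  rw [pvF_getD r i h]
  have h1 := pvL_le r i h
  have h2 := pvR_le r i h
  have : (i : Int) + 1 ≤ (r.length : Int) := by exact_mod_cast h
  omega

-- if r[i] > r[i-1] then F[i-1] + 1 ≤ F[i]
theorem pvF_up1 (r : List Int) (i : Nat) (h0 : 0 < i) (h : i < r.length)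
    (hr : r.getD i 0 > r.getD (i - 1) 0) :
    (pvF r).getD (i - 1) 0 + 1 ≤ (pvF r).getD i 0 := by
  obtain ⟨j, rfl⟩ : ∃ j, i = j + 1 := ⟨i - 1, by omega⟩
  simp only [Nat.add_sub_cancel] at hr ⊢
  have hRj : pvR r j = 1 := by
    rw [pvR_rec r j h, if_neg (by omega)]
  have hLj1 : pvL r (j + 1) = pvL r j + 1 := by
    rw [pvL_succ r j h, if_pos hr]
  rw [pvF_getD r j (by omega), pvF_getD r (j + 1) h, hRj, hLj1]
  have := pvL_pos r j (by omega)
  have := pvR_pos r (j + 1) h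
  omega

-- if r[i] > r[i+1] then F[i+1] + 1 ≤ F[i]
theorem pvF_up2 (r : List Int) (i : Nat) (h : i + 1 < r.length)
    (hr : r.getD i 0 > r.getD (i + 1) 0) :
    (pvF r).getD (i + 1) 0 + 1 ≤ (pvF r).getD i 0 := by
  have hL : pvL r (i + 1) = 1 := by
    rw [pvL_succ r i h, if_neg (by omega)]
  have hR : pvR r i = pvR r (i + 1) + 1 := by
    rw [pvR_rec r i h, if_pos hr]
  rw [pvF_getD r i (by omega), pvF_getD r (i + 1) h, hL, hR]
  have := pvL_pos r i (by omega)
  have := pvR_pos r (i + 1) h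
  omega

-- invariant of A's loop state
def pvInv (r : List Int) (c : List Int) : Prop :=
  c.length = r.length ∧ ∀ i, i < r.length → 1 ≤ c.getD i 0 ∧ c.getD i 0 ≤ (pvF r).getD i 0

theorem pvStepA_flag_mono (r : List Int) (n : Nat) (st : List Int × Bool) (i : Nat)
    (h : st.2 = true) : (pvStepA r n st i).2 = true := by
  unfold pvStepA
  dsimp only
  split <;> split <;> first | rfl | exact h

theorem pvFoldA_flag_mono (r : List Int) (n : Nat) (is : List Nat) (st : List Int × Bool)
    (h : st.2 = true) : (is.foldl (pvStepA r n) st).2 = true := by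
  induction is generalizing st with
  | nil => exact h
  | cons i is ih => exact ih _ (pvStepA_flag_mono r n st i h)

theorem pvFoldA_stuck (r : List Int) (n : Nat) (is : List Nat) (c : List Int)
    (h : (is.foldl (pvStepA r n) (c, false)).2 = false) :
    (is.foldl (pvStepA r n) (c, false)).1 = c ∧
      ∀ i ∈ is,
        ¬(0 < i ∧ r.getD i 0 > r.getD (i - 1) 0 ∧ c.getD i 0 ≤ c.getD (i - 1) 0) ∧
        ¬(i < n - 1 ∧ r.getD i 0 > r.getD (i + 1) 0 ∧ c.getD i 0 ≤ c.getD (i + 1) 0) := by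
  induction is with
  | nil => exact ⟨rfl, by simp⟩
  | cons i is ih =>
    rw [List.foldl_cons] at h ⊢
    by_cases h1 : 0 < i ∧ r.getD i 0 > r.getD (i - 1) 0 ∧ c.getD i 0 ≤ c.getD (i - 1) 0
    · exfalso
      have hf : (pvStepA r n (c, false) i).2 = true := by
        unfold pvStepA
        dsimp only
        rw [if_pos h1]
        split <;> rfl
      have := pvFoldA_flag_mono r n is _ hf
      rw [this] at h
      exact Bool.true_eq_false.mp h
    · by_cases h2 : i < n - 1 ∧ r.getD i 0 > r.getD (i + 1) 0 ∧ c.getD i 0 ≤ c.getD (i + 1) 0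
      · exfalso
        have hf : (pvStepA r n (c, false) i).2 = true := by
          unfold pvStepA
          dsimp only
          rw [if_neg h1]
          rw [if_pos h2]
        have := pvFoldA_flag_mono r n is _ hf
        rw [this] at h
        exact Bool.true_eq_false.mp h
      · have hstep : pvStepA r n (c, false) i = (c, false) := by
          unfold pvStepA
          dsimp only
          rw [if_neg h1]
          exact if_neg h2
        rw [hstep] at h ⊢
        obtain ⟨hc, hrest⟩ := ih h
        refine ⟨hc, ?_⟩
        intro j hj
        rcases List.mem_cons.mp hj with rfl | hj
        · exact ⟨h1, h2⟩
        · exact hrest j hj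

theorem pvInv_set (r : List Int) (c : List Int) (i : Nat) (v : Int) (hInv : pvInv r c)
    (_hi : i < r.length) (h1 : 1 ≤ v) (h2 : v ≤ (pvF r).getD i 0) : pvInv r (c.set i v) := by
  obtain ⟨hlen, hb⟩ := hInv
  refine ⟨by simp [hlen], ?_⟩
  intro j hj
  have hjc : j < c.length := by omega
  rw [List.getD_eq_getElem _ _ (by simpa using hjc), List.getElem_set]
  split_ifs with hij
  · exact ⟨h1, hij ▸ h2⟩
  · rw [← List.getD_eq_getElem _ _ hjc]
    exact hb j hj

theorem pvStepA_inv (r : List Int) (st : List Int × Bool) (i : Nat) (hi : i < r.length)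
    (hInv : pvInv r st.1) : pvInv r (pvStepA r r.length st i).1 := by
  unfold pvStepA
  dsimp only
  split_ifs with h1 h2 h2 <;> (try dsimp only)
  · -- both updates
    obtain ⟨hi0, hr1, hc1⟩ := h1
    have hInv2 : pvInv r (st.1.set i (st.1.getD (i - 1) 0 + 1)) := by
      apply pvInv_set r st.1 i _ hInv hi
      · have := (hInv.2 (i - 1) (by omega)).1; omega
      · have hup := pvF_up1 r i hi0 hi hr1
        have := (hInv.2 (i - 1) (by omega)).2
        omega
    dsimp only at h2
    obtain ⟨hi2, hr2, hc2⟩ := h2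
    apply pvInv_set r _ i _ hInv2 hi
    · have := (hInv2.2 (i + 1) (by omega)).1; omega
    · have hup := pvF_up2 r i (by omega) hr2
      have := (hInv2.2 (i + 1) (by omega)).2
      omega
  · -- first update only
    obtain ⟨hi0, hr1, hc1⟩ := h1
    apply pvInv_set r st.1 i _ hInv hi
    · have := (hInv.2 (i - 1) (by omega)).1; omega
    · have hup := pvF_up1 r i hi0 hi hr1
      have := (hInv.2 (i - 1) (by omega)).2
      omega
  · -- second update only
    obtain ⟨hi2, hr2, hc2⟩ := h2
    apply pvInv_set r st.1 i _ hInv hi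
    · have := (hInv.2 (i + 1) (by omega)).1; omega
    · have hup := pvF_up2 r i (by omega) hr2
      have := (hInv.2 (i + 1) (by omega)).2
      omega
  · exact hInv

theorem pvFoldA_inv (r : List Int) (is : List Nat) (st : List Int × Bool)
    (his : ∀ i ∈ is, i < r.length) (hInv : pvInv r st.1) :
    pvInv r (is.foldl (pvStepA r r.length) st).1 := by
  induction is generalizing st with
  | nil => exact hInv
  | cons i is ih =>
    exact ih _ (fun j hj => his j (List.mem_cons_of_mem _ hj))
      (pvStepA_inv r st i (his i List.mem_cons_self) hInv)

theorem pvSum_set (l : List Int) (i : Nat) (v : Int) (h : i < l.length) :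
    (l.set i v).sum = l.sum - l.getD i 0 + v := by
  induction l generalizing i with
  | nil => simp at h
  | cons x xs ih =>
    cases i with
    | zero => simp; ring
    | succ k =>
      have hk : k < xs.length := by simpa using h
      simp [ih k hk]
      ring

theorem pvStepA_len (r : List Int) (n : Nat) (st : List Int × Bool) (i : Nat) :
    (pvStepA r n st i).1.length = st.1.length := by
  unfold pvStepA
  dsimp only
  split_ifs <;> simp

theorem pvStepA_sum (r : List Int) (st : List Int × Bool) (i : Nat) (hi : i < r.length)
    (hlen : st.1.length = r.length) :
    st.1.sum ≤ (pvStepA r r.length st i).1.sum ∧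
      ((pvStepA r r.length st i).2 = true → st.2 = true ∨ st.1.sum < (pvStepA r r.length st i).1.sum) := by
  have hic : i < st.1.length := by omega
  unfold pvStepA
  dsimp only
  split_ifs with h1 h2 h2 <;> (try dsimp only)
  · obtain ⟨hi0, hr1, hc1⟩ := h1
    dsimp only at h2
    obtain ⟨hi2, hr2, hc2⟩ := h2
    have hs1 := pvSum_set st.1 i (st.1.getD (i - 1) 0 + 1) hic
    have hs2 := pvSum_set (st.1.set i (st.1.getD (i - 1) 0 + 1)) i
      ((st.1.set i (st.1.getD (i - 1) 0 + 1)).getD (i + 1) 0 + 1) (by simpa using hic)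
    constructor
    · omega
    · intro _; right; omega
  · obtain ⟨hi0, hr1, hc1⟩ := h1
    have hs1 := pvSum_set st.1 i (st.1.getD (i - 1) 0 + 1) hic
    exact ⟨by omega, fun _ => Or.inr (by omega)⟩
  · obtain ⟨hi2, hr2, hc2⟩ := h2
    have hs1 := pvSum_set st.1 i (st.1.getD (i + 1) 0 + 1) hic
    exact ⟨by omega, fun _ => Or.inr (by omega)⟩
  · exact ⟨le_refl _, fun hb => Or.inl hb⟩

theorem pvFoldA_sum (r : List Int) (is : List Nat) (st : List Int × Bool)
    (his : ∀ i ∈ is, i < r.length) (hlen : st.1.length = r.length) :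
    st.1.sum ≤ (is.foldl (pvStepA r r.length) st).1.sum ∧
      ((is.foldl (pvStepA r r.length) st).2 = true →
        st.2 = true ∨ st.1.sum < (is.foldl (pvStepA r r.length) st).1.sum) := by
  induction is generalizing st with
  | nil => exact ⟨le_refl _, fun hb => Or.inl hb⟩
  | cons i is ih =>
    have hi : i < r.length := his i List.mem_cons_self
    have hstep := pvStepA_sum r st i hi hlen
    have hlen' : (pvStepA r r.length st i).1.length = r.length := by
      rw [pvStepA_len]; exact hlen
    have hrest := ih (pvStepA r r.length st i)
      (fun j hj => his j (List.mem_cons_of_mem _ hj)) hlen'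
    rw [List.foldl_cons]
    refine ⟨le_trans hstep.1 hrest.1, ?_⟩
    intro hb
    rcases hrest.2 hb with hb' | hlt
    · rcases hstep.2 hb' with hb'' | hlt'
      · exact Or.inl hb''
      · exact Or.inr (lt_of_lt_of_le hlt' hrest.1)
    · exact Or.inr (lt_of_le_of_lt hstep.1 hlt)

-- at a full no-change pass the candies dominate both run-length lists
theorem pvStuck_ge (r : List Int) (c : List Int)
    (hpos : ∀ i, i < r.length → 1 ≤ c.getD i 0)
    (hstk : ∀ i, i < r.length →
        ¬(0 < i ∧ r.getD i 0 > r.getD (i - 1) 0 ∧ c.getD i 0 ≤ c.getD (i - 1) 0) ∧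
        ¬(i < r.length - 1 ∧ r.getD i 0 > r.getD (i + 1) 0 ∧ c.getD i 0 ≤ c.getD (i + 1) 0)) :
    ∀ i, i < r.length → (pvF r).getD i 0 ≤ c.getD i 0 := by
  have hL : ∀ i, i < r.length → pvL r i ≤ c.getD i 0 := by
    intro i
    induction i with
    | zero => intro h; rw [pvL_zero r h]; exact hpos 0 h
    | succ k ih =>
      intro h
      rw [pvL_succ r k h]
      split_ifs with hc
      · have h1 := (hstk (k + 1) h).1
        have hne : ¬(c.getD (k + 1) 0 ≤ c.getD k 0) := by
          intro hle
          exact h1 ⟨by omega, by simpa using hc, by simpa using hle⟩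
        have := ih (by omega)
        omega
      · exact hpos (k + 1) h
  have hR : ∀ k i, i < r.length → r.length - 1 - i = k → pvR r i ≤ c.getD i 0 := by
    intro k
    induction k with
    | zero =>
      intro i hi hk
      have : i = r.length - 1 := by omega
      subst this
      rw [pvR_last r (by omega)]
      exact hpos _ (by omega)
    | succ k ih =>
      intro i hi hk
      rw [pvR_rec r i (by omega)]
      split_ifs with hc
      · have h2 := (hstk i hi).2
        have hne : ¬(c.getD i 0 ≤ c.getD (i + 1) 0) := by
          intro hle
          exact h2 ⟨by omega, hc, hle⟩
        have := ih (i + 1) (by omega) (by omega)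
        omega
      · exact hpos i hi
  intro i hi
  rw [pvF_getD r i hi]
  exact max_le (hL i hi) (hR (r.length - 1 - i) i hi rfl)

theorem pvSum_le_sum (a b : List Int) (h : a.length = b.length)
    (hp : ∀ i, i < a.length → a.getD i 0 ≤ b.getD i 0) : a.sum ≤ b.sum := by
  induction a generalizing b with
  | nil =>
    have : b = [] := List.length_eq_zero_iff.mp h.symm
    subst this; simp
  | cons x xs ih =>
    cases b with
    | nil => simp at h
    | cons y ys =>
      have h0 := hp 0 (by simp)
      simp only [List.getD_cons_zero] at h0
      have hih := ih ys (by simpa using h) (fun i hi => by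
        have := hp (i + 1) (by simpa using Nat.succ_lt_succ hi)
        simpa using this)
      simp only [List.sum_cons]
      omega

theorem pvSum_le_card (l : List Int) (m : Int) (hp : ∀ i, i < l.length → l.getD i 0 ≤ m) :
    l.sum ≤ (l.length : Int) * m := by
  induction l with
  | nil => simp
  | cons x xs ih =>
    have h0 := hp 0 (by simp)
    simp only [List.getD_cons_zero] at h0
    have hih := ih (fun i hi => by
      have := hp (i + 1) (by simpa using Nat.succ_lt_succ hi)
      simpa using this)
    simp only [List.sum_cons, List.length_cons]
    have : ((xs.length : Int) + 1) * m = (xs.length : Int) * m + m := by ring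
    push_cast
    omega

theorem pvLoopA_eq (r : List Int) (fuel : Nat) (c : List Int) (hInv : pvInv r c)
    (hfuel : ((pvF r).sum - c.sum).toNat < fuel) :
    pvLoopA r r.length fuel c = pvF r := by
  induction fuel generalizing c with
  | zero =>
    exfalso
    have hle : c.sum ≤ (pvF r).sum :=
      pvSum_le_sum c (pvF r) (by rw [hInv.1, pvF_length]) (fun i hi =>
        (hInv.2 i (hInv.1 ▸ hi)).2)
    omega
  | succ f ih =>
    rw [pvLoopA]
    have hmem : ∀ i ∈ List.range r.length, i < r.length := fun i hi => List.mem_range.mp hi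
    cases hb : (pvPassA r r.length c).2
    · -- pass made no change: c is the fixpoint
      rw [if_neg Bool.false_ne_true]
      unfold pvPassA at hb ⊢
      obtain ⟨hc, hstk⟩ := pvFoldA_stuck r r.length (List.range r.length) c hb
      rw [hc]
      have hge := pvStuck_ge r c (fun i hi => (hInv.2 i hi).1)
        (fun i hi => hstk i (List.mem_range.mpr hi))
      apply List.ext_getElem (by rw [hInv.1, pvF_length])
      intro i h1 h2
      have hi : i < r.length := hInv.1 ▸ h1
      have := (hInv.2 i hi).2
      have := hge i hi
      rw [← List.getD_eq_getElem c 0 h1, ← List.getD_eq_getElem (pvF r) 0 h2]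
      omega
    · rw [if_pos rfl]
      have hInv' : pvInv r (pvPassA r r.length c).1 :=
        pvFoldA_inv r (List.range r.length) (c, false) hmem hInv
      have hP : List.foldl (pvStepA r r.length) (c, false) (List.range r.length) = pvPassA r r.length c := rfl
      have hsum := pvFoldA_sum r (List.range r.length) (c, false) hmem hInv.1
      rw [hP] at hsum
      dsimp only at hsum
      have hstrict : c.sum < (pvPassA r r.length c).1.sum := by
        rcases hsum.2 hb with h' | h'
        · exact absurd h' (by simp)
        · exact h'
      have hle : (pvPassA r r.length c).1.sum ≤ (pvF r).sum :=
        pvSum_le_sum _ (pvF r) (by rw [hInv'.1, pvF_length]) (fun i hi =>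
          (hInv'.2 i (hInv'.1 ▸ hi)).2)
      exact ih _ hInv' (by omega)

-- ===== VERDICT (by name: the statement is the Claim_ definition above) =====
theorem candy_brute_force_spec : Claim_equal_candy_brute_force := by
  intro ratings _
  unfold Spec_candy_brute_force
  by_cases hr : ratings = []
  · subst hr; rfl
  · have hn : 0 < ratings.length := List.length_pos_iff.mpr hr
    have halt : candy_brute_force_alt ratings = (pvF ratings).sum := rfl
    rw [halt]
    unfold candy_brute_force
    rw [if_neg hr]
    have hInv : pvInv ratings (List.replicate ratings.length 1) := by
      refine ⟨by simp, ?_⟩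
      intro i hi
      rw [List.getD_eq_getElem _ _ (by simpa using hi), List.getElem_replicate]
      exact ⟨le_refl 1, pvF_pos ratings i hi⟩
    have hFle : (pvF ratings).sum ≤ ((ratings.length * ratings.length : Nat) : Int) := by
      have := pvSum_le_card (pvF ratings) (ratings.length : Int) (fun i hi => by
        have : i < ratings.length := by rw [pvF_length] at hi; exact hi
        exact pvF_le ratings i this)
      rw [pvF_length] at this
      push_cast
      exact this
    have hrep : (List.replicate ratings.length (1 : Int)).sum = (ratings.length : Int) := by
      simp
    rw [pvLoopA_eq ratings _ _ hInv]
    omega
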